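-- pv_equiv track=rewrite | github.com/Ian-au789/SSAFY_APS_advance | DP/완전범죄.py | bfs
-- ===== SOURCE A (Python) =====
-- from collections import deque
--
-- def bfs(info, n, m):
--     size = len(info)
--
--     queue = deque()
--     if info[0][0] < n:
--         queue.append((info[0][0], 0, 0))
--     if info[0][1] < m:
--         queue.append((0, info[0][1], 0))
--
--     result = 1e9
--
--     while queue:
--         trace_a, trace_b, idx = queue.popleft()
--
--         if idx < size - 1:
--             if trace_a + info[idx + 1][0] < n:
--                 queue.append((trace_a + info[idx + 1][0], trace_b, idx + 1))
--
--             if trace_b + info[idx + 1][1] < m: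
--                 queue.append((trace_a, trace_b + info[idx + 1][1], idx + 1))
--
--         else:
--             if result > trace_a:
--                 result = trace_a
--
--     if result == 1e9:
--         return -1
--
--     return result
-- ===== SOURCE B (Python) =====
-- def bfs(info, n, m):
--     INF = 10 ** 9
--     # dp maps trace_b -> minimal trace_a among partial assignments reaching it
--     dp = {0: 0}
--     for row in info:
--         ca, cb = row[0], row[1]
--         ndp = {}
--         for tb, ta in dp.items():
--             if ta + ca < n:
--                 old = ndp.get(tb)
--                 if old is None or old > ta + ca:
--                     ndp[tb] = ta + ca
--             if tb + cb < m:
--                 old = ndp.get(tb + cb)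
--                 if old is None or old > ta:
--                     ndp[tb + cb] = ta
--         dp = ndp
--     best = min(dp.values(), default=INF)
--     return best if best < INF else -1
-- ===== Notes on version B (the rewrite author's own statement) =====
-- stated objective: faster
-- what changed: A explores every feasible assignment as a separate BFS-queue state (exponential in the number of items); B does a layered dynamic programming over the items keeping one dict entry per reachable trace_b with the minimal trace_a (duplicate and dominated states are pruned), then takes the min of the final layer.
-- outside the precondition, e.g. on bfs([[5, 5], [9]], 1, 1): A returns -1, B raises IndexError
import Mathlib
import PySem

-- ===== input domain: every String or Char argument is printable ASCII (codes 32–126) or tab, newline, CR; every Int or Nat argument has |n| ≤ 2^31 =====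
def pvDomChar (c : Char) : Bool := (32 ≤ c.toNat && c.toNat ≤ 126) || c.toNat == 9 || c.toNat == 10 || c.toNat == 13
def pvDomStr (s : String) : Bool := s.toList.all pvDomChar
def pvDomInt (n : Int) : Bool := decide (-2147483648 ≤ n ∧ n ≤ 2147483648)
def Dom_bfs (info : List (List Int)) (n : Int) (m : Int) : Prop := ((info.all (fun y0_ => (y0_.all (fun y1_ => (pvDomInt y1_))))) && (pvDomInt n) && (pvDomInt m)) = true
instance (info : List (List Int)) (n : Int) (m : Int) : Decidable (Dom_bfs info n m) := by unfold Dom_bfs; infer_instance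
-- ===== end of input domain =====

-- B replaces A's exponential BFS over all assignments by a layered dict DP keeping,
-- per item index and per reachable trace_b, only the minimal trace_a (dominated and
-- duplicate states are pruned); same return value on every input admitted by Pre_bfs.

-- ===== PORT A =====
-- while-loop over the deque, with fuel that (provably) suffices; popleft = head, append = ++ [·]
def bfsLoop (info : List (List Int)) (n m size : Int) :
    Nat → List (Int × Int × Int) → Int → Int
  | 0, _, result => result
  | _ + 1, [], result => result
  | fuel + 1, (ta, tb, idx) :: rest, result =>
    if idx < size - 1 then
      -- info[idx+1][0] / info[idx+1][1]; in range under Pre_bfs for every reachable state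
      let ca := PySem.List.pyGetD (PySem.List.pyGetD info (idx + 1) []) 0 0
      let cb := PySem.List.pyGetD (PySem.List.pyGetD info (idx + 1) []) 1 0
      let q1 := if ta + ca < n then rest ++ [(ta + ca, tb, idx + 1)] else rest
      let q2 := if tb + cb < m then q1 ++ [(ta, tb + cb, idx + 1)] else q1
      bfsLoop info n m size fuel q2 result
    else
      bfsLoop info n m size fuel rest (if result > ta then ta else result)

def bfs (info : List (List Int)) (n : Int) (m : Int) : Int :=
  let size := PySem.List.len info
  -- info[0][0], info[0][1]; in range under Pre_bfs
  let a0 := PySem.List.pyGetD (PySem.List.pyGetD info 0 []) 0 0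
  let b0 := PySem.List.pyGetD (PySem.List.pyGetD info 0 []) 1 0
  let q0 : List (Int × Int × Int) := if a0 < n then [(a0, 0, 0)] else []
  let q1 := if b0 < m then q0 ++ [(0, b0, 0)] else q0
  let result := bfsLoop info n m size (3 ^ info.length) q1 (10 ^ 9)
  if result = 10 ^ 9 then -1 else result

-- ===== PORT B =====
-- ndp.get(k) is None or > v  ⇒  ndp[k] = v
def relax (d : PySem.Dict Int Int) (k v : Int) : PySem.Dict Int Int :=
  match d.get? k with
  | none => d.insert k v
  | some old => if old > v then d.insert k v else d

-- one item: next layer from the current layer (p = (trace_b, min trace_a))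
def bfsStep (n m : Int) (d : PySem.Dict Int Int) (row : List Int) : PySem.Dict Int Int :=
  let ca := PySem.List.pyGetD row 0 0
  let cb := PySem.List.pyGetD row 1 0
  d.items.foldl (fun ndp p =>
    let ndp1 := if p.2 + ca < n then relax ndp p.1 (p.2 + ca) else ndp
    if p.1 + cb < m then relax ndp1 (p.1 + cb) p.2 else ndp1) PySem.Dict.empty

def bfs_alt (info : List (List Int)) (n : Int) (m : Int) : Int :=
  let dp := info.foldl (bfsStep n m) (PySem.Dict.empty.insert 0 0)
  let best := PySem.List.minD dp.values (fun x => x) (10 ^ 9)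
  if best < 10 ^ 9 then best else -1

-- ===== PRECONDITION & SPEC =====
-- Pre_ excludes the inputs on which Python A raises IndexError: an empty info, and rows with
-- fewer than two entries (A indexes row[0] and row[1] on every row it reaches; for a short row
-- that A never reaches, A returns -1 while B, which scans every row, raises — see cites).
def Pre_bfs (info : List (List Int)) (n : Int) (m : Int) : Prop :=
  info ≠ [] ∧ ∀ row ∈ info, 2 ≤ row.length
instance (info : List (List Int)) (n : Int) (m : Int) : Decidable (Pre_bfs info n m) := by
  unfold Pre_bfs; infer_instance

def pvWitness_bfs : List (List Int) × Int × Int := ([[1, 2], [3, 4]], 5, 5)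

def Spec_bfs (info : List (List Int)) (n : Int) (m : Int) (out : Int) : Prop := out = bfs_alt info n m
instance (info : List (List Int)) (n : Int) (m : Int) (out : Int) : Decidable (Spec_bfs info n m out) := by unfold Spec_bfs; infer_instance

-- ===== CLAIM (what is proved, stated in full; the proofs are below) =====
def Claim_equal_bfs : Prop := ∀ (info : List (List Int)) (n : Int) (m : Int), Dom_bfs info n m → Pre_bfs info n m → Spec_bfs info n m (bfs info n m)

-- ===== LEMMAS AND PROOFS =====

-- min over a list of extended integers (⊤ = no complete assignment)
def infT (l : List (WithTop Int)) : WithTop Int := l.foldr min ⊤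

-- spec: minimal final trace_a over all complete assignments of the remaining rows,
-- starting from partial traces (ta, tb); ⊤ if none is feasible
def mf (n m : Int) : List (List Int) → Int → Int → WithTop Int
  | [], ta, _ => (ta : WithTop Int)
  | row :: rest, ta, tb =>
    min (if ta + PySem.List.pyGetD row 0 0 < n then
           mf n m rest (ta + PySem.List.pyGetD row 0 0) tb else ⊤)
        (if tb + PySem.List.pyGetD row 1 0 < m then
           mf n m rest ta (tb + PySem.List.pyGetD row 1 0) else ⊤)

def qMeasure (size : Int) (q : List (Int × Int × Int)) : Nat :=
  (q.map (fun e => 3 ^ ((size - 1 - e.2.2).toNat))).sum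

def dictVal (n m : Int) (rest : List (List Int)) (d : PySem.Dict Int Int) : WithTop Int :=
  infT (d.items.map (fun p => mf n m rest p.2 p.1))

theorem infT_nil : infT [] = ⊤ := rfl
theorem infT_cons (x : WithTop Int) (l : List (WithTop Int)) :
    infT (x :: l) = min x (infT l) := rfl

theorem infT_append (a b : List (WithTop Int)) :
    infT (a ++ b) = min (infT a) (infT b) := by
  induction a with
  | nil => simp [infT]
  | cons x t ih => simp [infT_cons, List.cons_append, ih, min_assoc]

theorem infT_le_of_mem {x : WithTop Int} {l : List (WithTop Int)} (h : x ∈ l) :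
    infT l ≤ x := by
  induction l with
  | nil => cases h
  | cons y t ih =>
    rcases List.mem_cons.mp h with h | h
    · simp [infT_cons, h, min_le_left]
    · exact le_trans (by simp [infT_cons]) (ih h)

theorem mf_mono (n m : Int) (rest : List (List Int)) :
    ∀ (ta ta' tb : Int), ta ≤ ta' → mf n m rest ta tb ≤ mf n m rest ta' tb := by
  induction rest with
  | nil => intro ta ta' tb h; simpa [mf] using h
  | cons row t ih =>
    intro ta ta' tb h
    simp only [mf]
    apply min_le_min
    · by_cases h1 : ta' + PySem.List.pyGetD row 0 0 < n
      · rw [if_pos h1, if_pos (by omega)]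
        exact ih _ _ _ (by omega)
      · simp [h1]
    · by_cases h2 : tb + PySem.List.pyGetD row 1 0 < m
      · simpa [h2] using ih _ _ _ h
      · simp [h2]

theorem if_gt_eq_min (r x : Int) : (if r > x then x else r) = min r x := by
  split_ifs <;> omega

-- Python min(vals, default): PySem.List.min? characterised on Int with identity key
theorem min?_id_cons (t : List Int) : ∀ a : Int,
    PySem.List.min? (a :: t) (fun v => v) = some (t.foldl min a) := by
  induction t with
  | nil => intro a; rfl
  | cons x t ih =>
    intro a
    have h1 : PySem.List.min? (a :: x :: t) (fun v => v)
        = PySem.List.min? (min a x :: t) (fun v => v) := by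
      show List.foldl _ none (a :: x :: t) = List.foldl _ none (min a x :: t)
      rw [List.foldl_cons, List.foldl_cons, List.foldl_cons]
      congr 1
      show (if x < a then some x else some a) = some (min a x)
      split_ifs <;> simp <;> omega
    rw [h1, ih (min a x), List.foldl_cons]

theorem coe_foldl_min (vals : List Int) (a : Int) :
    ((vals.foldl min a : Int) : WithTop Int)
      = min (a : WithTop Int) (infT (vals.map (fun v : Int => (v : WithTop Int)))) := by
  induction vals generalizing a with
  | nil => simp [infT]
  | cons x t ih =>
    simp only [List.foldl_cons, List.map_cons, infT_cons]
    rw [ih, WithTop.coe_min, min_assoc]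

theorem relax_nodup (d : PySem.Dict Int Int) (k v : Int) (h : d.keys.Nodup) :
    (relax d k v).keys.Nodup := by
  unfold relax
  cases hg : d.get? k with
  | none => exact PySem.Dict.nodup_keys_insert d k v h
  | some old =>
    dsimp only
    split
    · exact PySem.Dict.nodup_keys_insert d k v h
    · exact h

theorem map_repl_id (k : Int) (v : Int) (l : List (Int × Int)) (h : ∀ p ∈ l, p.1 ≠ k) :
    l.map (fun p => if (p.1 == k) = true then (k, v) else p) = l := by
  induction l with
  | nil => rfl
  | cons p t ih =>
    simp only [List.map_cons]
    rw [if_neg (by simpa using h p (List.mem_cons_self)), ih (fun q hq => h q (List.mem_cons_of_mem _ hq))]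

theorem infT_map_update (f : Int × Int → WithTop Int) (k v old : Int) :
    ∀ (l : List (Int × Int)), (l.map Prod.fst).Nodup → (k, old) ∈ l →
      f (k, v) ≤ f (k, old) →
      infT ((l.map (fun p => if (p.1 == k) = true then (k, v) else p)).map f)
        = min (infT (l.map f)) (f (k, v)) := by
  intro l hnd hmem hle
  induction l with
  | nil => cases hmem
  | cons p t ih =>
    simp only [List.map_cons, List.nodup_cons] at hnd ⊢
    rcases List.mem_cons.mp hmem with hp | hp
    · subst hp
      simp only [BEq.rfl, if_true]
      have htid : t.map (fun p => if (p.1 == k) = true then (k, v) else p) = t := by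
        apply map_repl_id
        intro q hq hq1
        exact hnd.1 (by simpa [← hq1] using List.mem_map_of_mem (f := Prod.fst) hq)
      rw [htid, infT_cons, infT_cons]
      rw [min_comm (min (f (k, old)) (infT (t.map f))) (f (k, v)), ← min_assoc,
        min_eq_left hle]
    · have hpk : p.1 ≠ k := by
        intro hq1
        exact hnd.1 (by simpa [hq1] using List.mem_map_of_mem (f := Prod.fst) hp)
      rw [if_neg (by simpa using hpk)]
      rw [infT_cons, infT_cons, ih hnd.2 hp, ← min_assoc]

theorem dictVal_relax (n m : Int) (rest : List (List Int)) (d : PySem.Dict Int Int)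
    (k v : Int) (hnd : d.keys.Nodup) :
    dictVal n m rest (relax d k v) = min (dictVal n m rest d) (mf n m rest v k) := by
  have hndf : (d.items.map Prod.fst).Nodup := hnd
  unfold relax
  cases hg : d.get? k with
  | none =>
    have hc : d.contains k = false := (PySem.Dict.get?_eq_none_iff_contains d k).mp hg
    dsimp only
    unfold dictVal
    rw [PySem.Dict.items_insert_of_not_contains d v hc, List.map_append, infT_append]
    simp [infT_cons, infT]
  | some old =>
    have hmem : (k, old) ∈ d.items := PySem.Dict.mem_items_of_get?_eq_some d hg
    dsimp only
    split
    case isTrue h =>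
      have hc : d.contains k = true := by
        rw [PySem.Dict.contains_eq_isSome_get?, hg]; rfl
      unfold dictVal
      rw [PySem.Dict.items_insert_of_contains d v hc]
      exact infT_map_update (fun p => mf n m rest p.2 p.1) k v old d.items hndf hmem
        (mf_mono n m rest v old k (by omega))
    case isFalse h =>
      have h1 : dictVal n m rest d ≤ mf n m rest old k :=
        infT_le_of_mem (List.mem_map_of_mem (f := fun p => mf n m rest p.2 p.1) hmem)
      rw [min_eq_left (le_trans h1 (mf_mono n m rest old v k (by omega)))]

theorem foldl_step_nodup (n m : Int) (row : List Int) :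
    ∀ (l : List (Int × Int)) (ndp : PySem.Dict Int Int), ndp.keys.Nodup →
      (l.foldl (fun ndp p =>
        let ndp1 := if p.2 + PySem.List.pyGetD row 0 0 < n then
            relax ndp p.1 (p.2 + PySem.List.pyGetD row 0 0) else ndp
        if p.1 + PySem.List.pyGetD row 1 0 < m then
            relax ndp1 (p.1 + PySem.List.pyGetD row 1 0) p.2 else ndp1) ndp).keys.Nodup := by
  intro l
  induction l with
  | nil => intro ndp h; exact h
  | cons p t ih =>
    intro ndp h
    apply ih
    dsimp only
    split <;> split <;> first
      | exact relax_nodup _ _ _ (relax_nodup _ _ _ h)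
      | exact relax_nodup _ _ _ h
      | exact h

theorem foldl_step_val (n m : Int) (row : List Int) (rest : List (List Int)) :
    ∀ (l : List (Int × Int)) (ndp : PySem.Dict Int Int), ndp.keys.Nodup →
      dictVal n m rest (l.foldl (fun ndp p =>
          let ndp1 := if p.2 + PySem.List.pyGetD row 0 0 < n then
              relax ndp p.1 (p.2 + PySem.List.pyGetD row 0 0) else ndp
          if p.1 + PySem.List.pyGetD row 1 0 < m then
              relax ndp1 (p.1 + PySem.List.pyGetD row 1 0) p.2 else ndp1) ndp)
        = min (dictVal n m rest ndp)
            (infT (l.map (fun p => mf n m (row :: rest) p.2 p.1))) := by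
  intro l
  induction l with
  | nil => intro ndp _; simp [infT]
  | cons p t ih =>
    intro ndp h
    rw [List.foldl_cons, List.map_cons, infT_cons]
    have hstep : dictVal n m rest
        (let ndp1 := if p.2 + PySem.List.pyGetD row 0 0 < n then
            relax ndp p.1 (p.2 + PySem.List.pyGetD row 0 0) else ndp
         if p.1 + PySem.List.pyGetD row 1 0 < m then
            relax ndp1 (p.1 + PySem.List.pyGetD row 1 0) p.2 else ndp1)
        = min (dictVal n m rest ndp) (mf n m (row :: rest) p.2 p.1) := by
      show dictVal n m rest _ = _
      simp only [mf]
      by_cases h1 : p.2 + PySem.List.pyGetD row 0 0 < n <;>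
        by_cases h2 : p.1 + PySem.List.pyGetD row 1 0 < m <;>
        simp only [h1, h2, if_true, if_false, ite_true, ite_false]
      · rw [dictVal_relax _ _ _ _ _ _ (relax_nodup _ _ _ h), dictVal_relax _ _ _ _ _ _ h,
          min_assoc]
      · rw [dictVal_relax _ _ _ _ _ _ h]
        simp
      · rw [dictVal_relax _ _ _ _ _ _ h]
        simp
      · simp
    have hnd1 : (let ndp1 := if p.2 + PySem.List.pyGetD row 0 0 < n then
            relax ndp p.1 (p.2 + PySem.List.pyGetD row 0 0) else ndp
         if p.1 + PySem.List.pyGetD row 1 0 < m then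
            relax ndp1 (p.1 + PySem.List.pyGetD row 1 0) p.2 else ndp1).keys.Nodup := by
      dsimp only
      split <;> split <;> first
        | exact relax_nodup _ _ _ (relax_nodup _ _ _ h)
        | exact relax_nodup _ _ _ h
        | exact h
    rw [ih _ hnd1, hstep, min_assoc]

theorem bfsStep_nodup (n m : Int) (d : PySem.Dict Int Int) (row : List Int) :
    (bfsStep n m d row).keys.Nodup := by
  unfold bfsStep
  exact foldl_step_nodup n m row d.items PySem.Dict.empty (by simp [PySem.Dict.empty])

theorem bfsStep_val (n m : Int) (d : PySem.Dict Int Int) (row : List Int)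
    (rest : List (List Int)) (hnd : d.keys.Nodup) :
    dictVal n m rest (bfsStep n m d row) = dictVal n m (row :: rest) d := by
  unfold bfsStep
  rw [foldl_step_val n m row rest d.items PySem.Dict.empty (by simp [PySem.Dict.empty])]
  simp [dictVal, PySem.Dict.empty, infT]

theorem foldl_rows_val (n m : Int) :
    ∀ (rows : List (List Int)) (d : PySem.Dict Int Int), d.keys.Nodup →
      dictVal n m [] (rows.foldl (bfsStep n m) d) = dictVal n m rows d := by
  intro rows
  induction rows with
  | nil => intro d _; rfl
  | cons row t ih =>
    intro d hnd
    rw [List.foldl_cons, ih _ (bfsStep_nodup n m d row), bfsStep_val n m d row t hnd]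

theorem qMeasure_append (s : Int) (a b : List (Int × Int × Int)) :
    qMeasure s (a ++ b) = qMeasure s a + qMeasure s b := by
  simp [qMeasure]

theorem qMeasure_singleton (s x y z : Int) :
    qMeasure s [(x, y, z)] = 3 ^ ((s - 1 - z).toNat) := by
  simp [qMeasure]

theorem bfsLoop_eq (info : List (List Int)) (n m : Int) :
    ∀ (fuel : Nat) (q : List (Int × Int × Int)) (result : Int),
      (∀ e ∈ q, 0 ≤ e.2.2 ∧ e.2.2 < (info.length : Int)) →
      qMeasure (info.length : Int) q ≤ fuel →
      ((bfsLoop info n m (info.length : Int) fuel q result : Int) : WithTop Int)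
        = min (result : WithTop Int)
            (infT (q.map (fun e => mf n m (info.drop (e.2.2.toNat + 1)) e.1 e.2.1))) := by
  intro fuel
  induction fuel with
  | zero =>
    intro q result hb hm
    cases q with
    | nil => simp [bfsLoop, infT]
    | cons e t =>
      exfalso
      have h1 : 1 ≤ 3 ^ (((info.length : Int) - 1 - e.2.2).toNat) := Nat.one_le_pow _ _ (by norm_num)
      simp only [qMeasure, List.map_cons, List.sum_cons, Nat.le_zero] at hm
      omega
  | succ fuel ih =>
    intro q result hb hm
    cases q with
    | nil => simp [bfsLoop, infT]
    | cons e rest =>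
      obtain ⟨ta, tb, idx⟩ := e
      obtain ⟨h0, hup⟩ : 0 ≤ idx ∧ idx < (info.length : Int) := hb _ (List.mem_cons_self)
      have hbrest : ∀ e ∈ rest, 0 ≤ e.2.2 ∧ e.2.2 < (info.length : Int) :=
        fun e he => hb e (List.mem_cons_of_mem _ he)
      have hmc : 3 ^ (((info.length : Int) - 1 - idx).toNat)
          + qMeasure (info.length : Int) rest ≤ fuel + 1 := by
        simpa [qMeasure] using hm
      by_cases hlt : idx < (info.length : Int) - 1
      · -- expansion step
        have hk1L : idx.toNat + 1 < info.length := by omega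
        have hrow : PySem.List.pyGetD info (idx + 1) ([] : List Int)
            = info[idx.toNat + 1] := by
          rw [PySem.List.pyGetD_eq_getElem info ([] : List Int) (by omega) (by push_cast; omega)]
          congr 1
          omega
        have hdrop : info.drop (idx.toNat + 1) = info[idx.toNat + 1] :: info.drop (idx.toNat + 1 + 1) :=
          List.drop_eq_getElem_cons hk1L
        have htn : (idx + 1).toNat = idx.toNat + 1 := by omega
        have hp1 : 1 ≤ 3 ^ (((info.length : Int) - 1 - (idx + 1)).toNat) :=
          Nat.one_le_pow _ _ (by norm_num)
        have hpow : 3 ^ (((info.length : Int) - 1 - idx).toNat)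
            = 3 * 3 ^ (((info.length : Int) - 1 - (idx + 1)).toNat) := by
          rw [show ((info.length : Int) - 1 - idx).toNat
              = ((info.length : Int) - 1 - (idx + 1)).toNat + 1 by omega, pow_succ]
          ring
        rw [hpow] at hmc
        have hbnew : ∀ c : Int, ∀ e ∈ ([(c, tb, idx + 1)] : List (Int × Int × Int)) , 0 ≤ e.2.2 ∧ e.2.2 < (info.length : Int) := by
          intro c e he
          simp at he
          subst he
          dsimp only
          omega
        have hbnew2 : ∀ c : Int, ∀ e ∈ ([(ta, c, idx + 1)] : List (Int × Int × Int)) , 0 ≤ e.2.2 ∧ e.2.2 < (info.length : Int) := by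
          intro c e he
          simp at he
          subst he
          dsimp only
          omega
        simp only [bfsLoop, if_pos hlt]
        rw [hrow]
        set ca := PySem.List.pyGetD info[idx.toNat + 1] 0 0 with hca
        set cb := PySem.List.pyGetD info[idx.toNat + 1] 1 0 with hcb
        have hvale : mf n m (info.drop (idx.toNat + 1)) ta tb
            = min (if ta + ca < n then mf n m (info.drop (idx.toNat + 1 + 1)) (ta + ca) tb else ⊤)
                  (if tb + cb < m then mf n m (info.drop (idx.toNat + 1 + 1)) ta (tb + cb) else ⊤) := by
          rw [hdrop]; rfl
        by_cases hc1 : ta + ca < n <;> by_cases hc2 : tb + cb < m <;>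
          simp only [hc1, hc2, if_true, if_false, ite_true, ite_false]
        · rw [ih _ result
            (by intro e he
                rcases List.mem_append.mp he with he | he
                · rcases List.mem_append.mp he with he | he
                  · exact hbrest e he
                  · exact hbnew _ e he
                · exact hbnew2 _ e he)
            (by rw [qMeasure_append, qMeasure_append, qMeasure_singleton, qMeasure_singleton]
                omega)]
          simp only [List.map_append, List.map_cons, List.map_nil, infT_append, infT_cons]
          rw [hvale]
          simp only [htn, if_pos hc1, if_pos hc2]
          simp [infT, min_assoc, min_comm, min_left_comm]
        · rw [ih _ result
            (by intro e he
                rcases List.mem_append.mp he with he | he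
                · exact hbrest e he
                · exact hbnew _ e he)
            (by rw [qMeasure_append, qMeasure_singleton]
                omega)]
          simp only [List.map_append, List.map_cons, List.map_nil, infT_append, infT_cons]
          rw [hvale]
          simp only [htn, if_pos hc1, if_neg hc2]
          simp [infT, min_assoc, min_comm, min_left_comm]
        · rw [ih _ result
            (by intro e he
                rcases List.mem_append.mp he with he | he
                · exact hbrest e he
                · exact hbnew2 _ e he)
            (by rw [qMeasure_append, qMeasure_singleton]
                omega)]
          simp only [List.map_append, List.map_cons, List.map_nil, infT_append, infT_cons]
          rw [hvale]
          simp only [htn, if_neg hc1, if_pos hc2]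
          simp [infT, min_assoc, min_comm, min_left_comm]
        · rw [ih _ result hbrest (by omega)]
          rw [List.map_cons, infT_cons, hvale]
          simp only [if_neg hc1, if_neg hc2]
          simp [min_assoc, min_comm, min_left_comm]
      · -- final state
        have hdropnil : info.drop (idx.toNat + 1) = [] := by
          apply List.drop_eq_nil_of_le
          omega
        have h1 : 1 ≤ 3 ^ (((info.length : Int) - 1 - idx).toNat) :=
          Nat.one_le_pow _ _ (by norm_num)
        simp only [bfsLoop, if_neg hlt]
        rw [ih _ _ hbrest (by omega)]
        rw [if_gt_eq_min, List.map_cons, infT_cons, hdropnil]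
        rw [WithTop.coe_min]
        simp [mf, min_assoc]

theorem final_eq (R : Int) (vals : List Int)
    (hR : (R : WithTop Int)
      = min (((10 ^ 9 : Int)) : WithTop Int) (infT (vals.map (fun v : Int => (v : WithTop Int))))) :
    (if R = 10 ^ 9 then -1 else R)
      = (if PySem.List.minD vals (fun x => x) (10 ^ 9) < 10 ^ 9 then
          PySem.List.minD vals (fun x => x) (10 ^ 9) else -1) := by
  cases vals with
  | nil =>
    simp only [List.map_nil, infT_nil] at hR
    rw [min_eq_left le_top] at hR
    have hReq : R = 10 ^ 9 := by exact_mod_cast hR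
    simp [PySem.List.minD, PySem.List.min?, hReq]
  | cons x vrest =>
    have hmin : PySem.List.minD (x :: vrest) (fun x => x) (10 ^ 9) = vrest.foldl min x := by
      rw [PySem.List.minD, min?_id_cons]
      rfl
    have hV : infT ((x :: vrest).map (fun v : Int => (v : WithTop Int)))
        = ((vrest.foldl min x : Int) : WithTop Int) := by
      rw [coe_foldl_min, List.map_cons, infT_cons]
    rw [hV, ← WithTop.coe_min] at hR
    have hReq : R = min (10 ^ 9) (vrest.foldl min x) := by exact_mod_cast hR
    rw [hmin]
    by_cases hlt : vrest.foldl min x < 10 ^ 9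
    · rw [if_pos hlt, if_neg (by omega)]
      omega
    · rw [if_neg hlt, if_pos (by omega)]

theorem init_items : (PySem.Dict.empty.insert 0 0 : PySem.Dict Int Int).items = [(0, 0)] := rfl

theorem bfs_eq_alt (info : List (List Int)) (n m : Int) (hpre : Pre_bfs info n m) :
    bfs info n m = bfs_alt info n m := by
  obtain ⟨hne, -⟩ := hpre
  obtain ⟨row0, restInfo, rfl⟩ : ∃ r t, info = r :: t := by
    cases info with
    | nil => exact absurd rfl hne
    | cons r t => exact ⟨r, t, rfl⟩
  -- B side value
  have hnodup : (PySem.Dict.empty.insert 0 0 : PySem.Dict Int Int).keys.Nodup := by decide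
  have hdp := foldl_rows_val n m (row0 :: restInfo) (PySem.Dict.empty.insert 0 0) hnodup
  have hinit : dictVal n m (row0 :: restInfo) (PySem.Dict.empty.insert 0 0)
      = mf n m (row0 :: restInfo) 0 0 := by
    unfold dictVal
    rw [init_items]
    simp [infT_cons, infT_nil, min_eq_left le_top]
  rw [hinit] at hdp
  set dp := (row0 :: restInfo).foldl (bfsStep n m) (PySem.Dict.empty.insert 0 0) with hdpdef
  have hvals : infT (dp.values.map (fun v : Int => (v : WithTop Int)))
      = mf n m (row0 :: restInfo) 0 0 := by
    rw [← hdp]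
    unfold dictVal
    simp only [PySem.Dict.values, List.map_map]
    rfl
  -- A side
  have hb0 : (0 : Int) ≤ 0 ∧ (0 : Int) < ((row0 :: restInfo).length : Int) := by
    simp
  have hL : (((row0 :: restInfo).length : Int) - 1 - 0).toNat = restInfo.length := by
    simp only [List.length_cons]
    omega
  have hp3 : (3 : Nat) ^ (row0 :: restInfo).length = 3 * 3 ^ restInfo.length := by
    rw [List.length_cons, pow_succ]
    ring
  have hp1 : 1 ≤ (3 : Nat) ^ restInfo.length := Nat.one_le_pow _ _ (by norm_num)
  simp only [bfs, bfs_alt, PySem.List.len_eq, PySem.List.pyGetD_zero_cons]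
  rw [← hdpdef]
  by_cases hA : PySem.List.pyGetD row0 0 0 < n <;>
    by_cases hB : PySem.List.pyGetD row0 1 0 < m <;>
    simp only [hA, hB, if_true, if_false, ite_true, ite_false]
  · apply final_eq _ _ _
    rw [hvals]
    rw [bfsLoop_eq (row0 :: restInfo) n m _ _ _
      (by intro e he
          rcases List.mem_append.mp he with he | he <;>
            · simp at he; subst he; exact hb0)
      (by rw [qMeasure_append, qMeasure_singleton, qMeasure_singleton, hL, hp3]
          omega)]
    congr 1
    simp only [List.map_cons, List.map_nil, infT_cons, infT_nil, mf]
    simp [hA, hB, infT_cons, infT_nil, min_eq_left le_top]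
  · apply final_eq _ _ _
    rw [hvals]
    rw [bfsLoop_eq (row0 :: restInfo) n m _ _ _
      (by intro e he
          simp at he; subst he; exact hb0)
      (by rw [qMeasure_singleton, hL, hp3]
          omega)]
    congr 1
    simp only [List.map_cons, List.map_nil, infT_cons, infT_nil, mf]
    simp [hA, hB, infT_cons, infT_nil, min_eq_left le_top]
  · apply final_eq _ _ _
    rw [hvals]
    rw [bfsLoop_eq (row0 :: restInfo) n m _ _ _
      (by intro e he
          simp at he; subst he; exact hb0)
      (by rw [List.nil_append, qMeasure_singleton, hL, hp3]
          omega)]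
    congr 1
    simp only [List.nil_append, List.map_cons, List.map_nil, infT_cons, infT_nil, mf]
    simp [hA, hB, infT_cons, infT_nil, min_eq_left le_top]
  · apply final_eq _ _ _
    rw [hvals]
    rw [bfsLoop_eq (row0 :: restInfo) n m _ _ _
      (by intro e he; cases he)
      (by simp [qMeasure])]
    congr 1
    simp only [List.map_nil, infT_nil, mf]
    simp [hA, hB, infT_cons, infT_nil]

-- ===== VERDICT (by name: the statement is the Claim_ definition above) =====
theorem bfs_spec : Claim_equal_bfs := by
  intro info n m _ hpre
  unfold Spec_bfs
  exact bfs_eq_alt info n m hpre
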